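-- pv_equiv track=rewrite | github.com/datawizzard/leetcode-prep | codeforces-leetcode/fair_no.py | check
-- ===== SOURCE A (Python) =====
-- def check(x):
-- 	y=x
-- 	while y:
-- 		a=y%10
-- 		if a!=0 and x%a!=0:
-- 			return False
-- 		y//=10
-- 	return True
-- ===== SOURCE B (Python) =====
-- def check(x):
--     l = 1
--     y = x
--     while y:
--         a = y % 10
--         if a:
--             g, b = l, a
--             while b:
--                 g, b = b, g % b
--             l = l * a // g
--         if x % l:
--             return False
--         y //= 10
--     return True
-- ===== Notes on version B (the rewrite author's own statement) =====
-- stated objective: alternative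
-- what changed: B maintains the running LCM of the nonzero digits seen so far (via an explicit Euclid gcd loop) and bails out when x stops being divisible by that LCM, instead of A's per-digit divisibility test.
import Mathlib
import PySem

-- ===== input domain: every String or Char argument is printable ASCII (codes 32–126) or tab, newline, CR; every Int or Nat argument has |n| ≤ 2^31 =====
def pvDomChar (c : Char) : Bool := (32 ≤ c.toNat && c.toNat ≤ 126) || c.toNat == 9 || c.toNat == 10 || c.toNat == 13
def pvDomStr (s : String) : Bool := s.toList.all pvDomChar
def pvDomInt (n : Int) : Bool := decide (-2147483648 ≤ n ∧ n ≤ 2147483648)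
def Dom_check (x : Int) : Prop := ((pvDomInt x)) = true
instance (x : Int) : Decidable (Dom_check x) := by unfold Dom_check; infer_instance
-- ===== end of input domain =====

-- B keeps the running LCM of the nonzero digits (explicit Euclid gcd) and tests x against that LCM
-- instead of A's per-digit divisibility test (alternative decomposition, not claimed faster).
-- ===== PORT A =====
-- A's while loop: digit a = y % 10 (Python floor semantics = Lean's % for the positive literal 10),
-- early `return False`. For negative y Python's loop gets stuck at y = -1 (−1 // 10 = −1): it returns
-- False there iff x % 9 ≠ 0 and otherwise never returns; at that never-returning state the port stops
-- with `true` (a totality guard on a state where Python A returns nothing).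
def checkLoop (x y : Int) : Bool :=
  if y = 0 then true
  else
    let a : Int := y % 10
    if a ≠ 0 ∧ x % a ≠ 0 then false
    else if y = -1 then true  -- Python A diverges from this state; it never returns here
    else checkLoop x (y / 10)
termination_by y.natAbs
decreasing_by omega

def check (x : Int) : Bool := checkLoop x x

-- ===== PORT B =====
-- B's inner Euclid loop: g, b = b, g % b while b.
def gcdLoop (g b : Int) : Int :=
  if b = 0 then g else gcdLoop b (g % b)
termination_by b.natAbs
decreasing_by
  rename_i hb
  have h1 := Int.emod_nonneg g hb
  have h2 := Int.emod_lt g hb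
  omega

-- B's while loop: fold the digit into the running lcm l, then test x % l; same stuck state y = -1,
-- where Python B likewise returns False or never returns (same totality guard).
def altLoop (x l y : Int) : Bool :=
  if y = 0 then true
  else
    let a : Int := y % 10
    let l' : Int := if a ≠ 0 then l * a / gcdLoop l a else l
    if x % l' ≠ 0 then false
    else if y = -1 then true  -- Python B diverges from this state; it never returns here
    else altLoop x l' (y / 10)
termination_by y.natAbs
decreasing_by omega

def check_alt (x : Int) : Bool := altLoop x 1 x

-- ===== PRECONDITION & SPEC =====
def Spec_check (x : Int) (out : Bool) : Prop := out = check_alt x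
instance (x : Int) (out : Bool) : Decidable (Spec_check x out) := by unfold Spec_check; infer_instance

-- ===== CLAIM (what is proved, stated in full; the proofs are below) =====
def Claim_equal_check : Prop := ∀ (x : Int), Dom_check x → Spec_check x (check x)

-- ===== LEMMAS AND PROOFS =====

theorem gcdLoop_eq (b g : Nat) : gcdLoop (g : Int) (b : Int) = (Nat.gcd b g : Int) := by
  induction b using Nat.strong_induction_on generalizing g with
  | _ b ih =>
    rw [gcdLoop]
    by_cases hb : b = 0
    · simp [hb]
    · rw [if_neg (by exact_mod_cast hb)]
      have hcast : (g : Int) % (b : Int) = ((g % b : Nat) : Int) := by push_cast; ring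
      rw [hcast, ih (g % b) (Nat.mod_lt _ (Nat.pos_of_ne_zero hb)) b]
      exact_mod_cast (Nat.gcd_rec b g).symm

theorem lcm_step (l a : Int) (hl : 0 < l) (ha : 0 < a) :
    l * a / gcdLoop l a = (Nat.lcm l.toNat a.toNat : Int) := by
  have hl' : ((l.toNat : Nat) : Int) = l := Int.toNat_of_nonneg hl.le
  have ha' : ((a.toNat : Nat) : Int) = a := Int.toNat_of_nonneg ha.le
  rw [← hl', ← ha', gcdLoop_eq, Nat.gcd_comm, Nat.lcm]
  push_cast
  rfl

theorem lcm_dvd_iff' (x l a : Int) (hl : 0 < l) (ha : 0 < a) :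
    ((Nat.lcm l.toNat a.toNat : Nat) : Int) ∣ x ↔ (l ∣ x ∧ a ∣ x) := by
  rw [Int.natCast_dvd, Nat.lcm_dvd_iff, ← Int.natCast_dvd, ← Int.natCast_dvd,
    Int.toNat_of_nonneg hl.le, Int.toNat_of_nonneg ha.le]

theorem loop_eq (x : Int) (n : Nat) : ∀ (y l : Int), y.natAbs ≤ n → 0 < l → x % l = 0 →
    checkLoop x y = altLoop x l y := by
  induction n with
  | zero =>
    intro y l hy _ _
    have : y = 0 := by omega
    rw [this, checkLoop, altLoop]; simp
  | succ n ih =>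
    intro y l hy hl hx
    rw [checkLoop, altLoop]
    by_cases hy0 : y = 0
    · simp [hy0]
    · rw [if_neg hy0, if_neg hy0]
      have haR : 0 ≤ y % 10 ∧ y % 10 < 10 :=
        ⟨Int.emod_nonneg y (by norm_num), Int.emod_lt_of_pos y (by norm_num)⟩
      by_cases haz : y % 10 = 0
      · have hy1 : y ≠ -1 := by intro h; rw [h] at haz; norm_num at haz
        have hyn : (y / 10).natAbs ≤ n := by omega
        simp [haz, hx, hy1]
        exact ih (y / 10) l hyn hl hx
      · have ha : 0 < y % 10 := lt_of_le_of_ne haR.1 (Ne.symm haz)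
        have hLs := lcm_step l (y % 10) hl ha
        have hLpos : 0 < ((Nat.lcm l.toNat (y % 10).toNat : Nat) : Int) := by
          have hne : Nat.lcm l.toNat (y % 10).toNat ≠ 0 :=
            Nat.lcm_ne_zero (by omega) (by omega)
          exact_mod_cast Nat.pos_of_ne_zero hne
        have hdvd := lcm_dvd_iff' x l (y % 10) hl ha
        by_cases hxa : x % (y % 10) = 0
        · have hxL : x % ((Nat.lcm l.toNat (y % 10).toNat : Nat) : Int) = 0 :=
            Int.emod_eq_zero_of_dvd
              (hdvd.mpr ⟨Int.dvd_of_emod_eq_zero hx, Int.dvd_of_emod_eq_zero hxa⟩)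
          simp [haz, hLs, hxa, hxL]
          by_cases hy1 : y = -1
          · simp [hy1]
          · have hyn : (y / 10).natAbs ≤ n := by omega
            simp [hy1]
            exact ih (y / 10) _ hyn hLpos hxL
        · have hxL : x % ((Nat.lcm l.toNat (y % 10).toNat : Nat) : Int) ≠ 0 := by
            intro h
            exact hxa (Int.emod_eq_zero_of_dvd ((hdvd.mp (Int.dvd_of_emod_eq_zero h)).2))
          simp [haz, hxa, hLs, hxL]

-- ===== VERDICT (by name: the statement is the Claim_ definition above) =====
theorem check_spec : Claim_equal_check := by
  intro x _
  unfold Spec_check check check_alt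
  exact loop_eq x x.natAbs x 1 le_rfl (by norm_num) (by simp)
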